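-- pv_equiv track=rewrite | github.com/josecl200/VC-PoodlePOC | real_oracle.py | compute_dn_lengths
-- ===== SOURCE A (Python) =====
-- def compute_dn_lengths(password: str, block_size: int = 16,
--                        dn_base_len: int = 0) -> list[dict]:
--     """For each password byte, compute dn_prefix_len and control_pad_len such that:
--
--     1. The target password byte lands at the last byte of a CBC block:
--        (14 + dn_prefix_len + dn_base_len + i) % block_size == block_size - 1
--
--     2. The last plaintext block is entirely padding (force_full_block):
--        (total_ldap_len + MAC_LEN) % block_size == 0
--
--     dn_base_len must be included — the DN prefix is prepended to the existing DN,
--     so the absolute offset of password byte i is 14 + k + dn_base_len + i.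
--
--     block_size: 16 for AES-128-CBC, 8 for 3DES-EDE-CBC (Windows Server default).
--     """
--     MAC_LEN = 20
--     CTRL_OVERHEAD = 12   # fixed bytes added by the LDAP control structure (excl. j)
--     pw_len = len(password)
--
--     results = []
--     for i in range(pw_len):
--         # constraint 1: (14 + k + dn_base_len + i) % block_size == block_size - 1
--         k = (block_size - 1 - (14 + dn_base_len + i) % block_size) % block_size
--
--         # total LDAP message without control padding:
--         # 14 (fixed overhead) + k (dn prefix) + dn_base_len + pw_len
--         base_total = 14 + k + dn_base_len + pw_len
--
--         # constraint 2: (base_total + CTRL_OVERHEAD + j + MAC_LEN) % block_size == 0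
--         j = (-(base_total + CTRL_OVERHEAD + MAC_LEN)) % block_size
--
--         results.append({
--             "byte_index":    i,
--             "dn_prefix_len": k,
--             "control_pad_len": j,
--         })
--
--     return results
-- ===== SOURCE B (Python) =====
-- def compute_dn_lengths(password: str, block_size: int = 16,
--                        dn_base_len: int = 0) -> list[dict]:
--     """Table-driven variant: stage 1 precomputes one (dn_prefix_len, control_pad_len)
--     pair per residue class of the absolute offset mod block_size (the first
--     min(pw_len, |block_size|) offsets hit every residue that occurs, since residues
--     cycle with period |block_size|); stage 2 is a pure per-byte table lookup."""
--     MAC_LEN = 20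
--     CTRL_OVERHEAD = 12
--     pw_len = len(password)
--
--     # stage 1: one (k, j) entry per occurring residue class
--     table = {}
--     for t in range(min(pw_len, abs(block_size))):
--         r = (14 + dn_base_len + t) % block_size
--         k = (block_size - 1 - r) % block_size
--         j = (-(14 + k + dn_base_len + pw_len + CTRL_OVERHEAD + MAC_LEN)) % block_size
--         table[r] = (k, j)
--
--     # stage 2: per byte, look the pair up by residue
--     results = []
--     for i in range(pw_len):
--         k, j = table[(14 + dn_base_len + i) % block_size]
--         results.append({"byte_index": i, "dn_prefix_len": k, "control_pad_len": j})
--     return results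
-- ===== Notes on version B (the rewrite author's own statement) =====
-- stated objective: alternative
-- what changed: B is table-driven: a first pass builds a dict mapping each occurring offset-residue mod block_size to its (dn_prefix_len, control_pad_len) pair, and the per-byte pass becomes a pure dictionary lookup instead of A's per-byte modular arithmetic.
import Mathlib
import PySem

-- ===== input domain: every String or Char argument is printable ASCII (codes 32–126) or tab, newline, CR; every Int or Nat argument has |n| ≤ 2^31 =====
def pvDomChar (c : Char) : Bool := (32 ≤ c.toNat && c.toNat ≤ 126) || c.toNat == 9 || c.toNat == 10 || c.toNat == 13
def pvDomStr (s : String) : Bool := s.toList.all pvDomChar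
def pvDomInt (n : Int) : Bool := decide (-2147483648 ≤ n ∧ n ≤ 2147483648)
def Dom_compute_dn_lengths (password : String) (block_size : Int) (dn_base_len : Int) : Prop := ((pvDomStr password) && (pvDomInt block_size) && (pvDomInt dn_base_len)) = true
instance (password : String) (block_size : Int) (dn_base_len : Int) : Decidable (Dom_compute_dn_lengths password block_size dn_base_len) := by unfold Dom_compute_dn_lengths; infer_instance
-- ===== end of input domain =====

-- B precomputes a residue-indexed lookup table (one (k, j) pair per residue class of the
-- byte offset mod block_size) and then resolves each byte by a table lookup
-- (objective: alternative decomposition; same asymptotic cost as A).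

-- ===== PORT A =====
def compute_dn_lengths (password : String) (block_size : Int) (dn_base_len : Int) : List (List (String × Int)) :=
  let pw_len : Int := PySem.Str.len password
  (PySem.List.pyRange 0 pw_len 1).foldl (fun results i =>
    let k := PySem.Int.mod (block_size - 1 - PySem.Int.mod (14 + dn_base_len + i) block_size) block_size
    let base_total := 14 + k + dn_base_len + pw_len
    let j := PySem.Int.mod (-(base_total + 12 + 20)) block_size
    results ++ [[("byte_index", i), ("dn_prefix_len", k), ("control_pad_len", j)]]) []

-- ===== PORT B =====
def compute_dn_lengths_alt (password : String) (block_size : Int) (dn_base_len : Int) : List (List (String × Int)) :=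
  let pw_len : Int := PySem.Str.len password
  -- stage 1: one (k, j) entry per occurring residue class
  let table : PySem.Dict Int (Int × Int) :=
    (PySem.List.pyRange 0 (min pw_len |block_size|) 1).foldl (fun d t =>
      let r := PySem.Int.mod (14 + dn_base_len + t) block_size
      let k := PySem.Int.mod (block_size - 1 - r) block_size
      let j := PySem.Int.mod (-(14 + k + dn_base_len + pw_len + 12 + 20)) block_size
      d.insert r (k, j)) PySem.Dict.empty
  -- stage 2: per byte, look the pair up by residue
  (PySem.List.pyRange 0 pw_len 1).foldl (fun results i =>
    match table.get? (PySem.Int.mod (14 + dn_base_len + i) block_size) with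
    | some (k, j) => results ++ [[("byte_index", i), ("dn_prefix_len", k), ("control_pad_len", j)]]
    | none => results  -- Python raises KeyError here; unreachable under Pre_ (the key is always present)
    ) []

-- ===== PRECONDITION & SPEC =====
-- Pre_ excludes only block_size = 0 with a nonempty password, where A raises ZeroDivisionError
-- (B raises there too).
def Pre_compute_dn_lengths (password : String) (block_size : Int) (dn_base_len : Int) : Prop :=
  block_size ≠ 0 ∨ password = ""
instance (password : String) (block_size : Int) (dn_base_len : Int) : Decidable (Pre_compute_dn_lengths password block_size dn_base_len) := by unfold Pre_compute_dn_lengths; infer_instance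

def pvWitness_compute_dn_lengths : String × Int × Int := ("secret", 16, 42)

def Spec_compute_dn_lengths (password : String) (block_size : Int) (dn_base_len : Int) (out : List (List (String × Int))) : Prop := out = compute_dn_lengths_alt password block_size dn_base_len
instance (password : String) (block_size : Int) (dn_base_len : Int) (out : List (List (String × Int))) : Decidable (Spec_compute_dn_lengths password block_size dn_base_len out) := by unfold Spec_compute_dn_lengths; infer_instance

-- ===== CLAIM (what is proved, stated in full; the proofs are below) =====
def Claim_equal_compute_dn_lengths : Prop := ∀ (password : String) (block_size : Int) (dn_base_len : Int), Dom_compute_dn_lengths password block_size dn_base_len → Pre_compute_dn_lengths password block_size dn_base_len → Spec_compute_dn_lengths password block_size dn_base_len (compute_dn_lengths password block_size dn_base_len)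

-- ===== LEMMAS AND PROOFS =====

-- Python % with a fixed nonzero divisor only depends on the residue class of the dividend.
lemma pymod_congr {a a' b : Int} (hb : b ≠ 0) (h : b ∣ a - a') :
    PySem.Int.mod a b = PySem.Int.mod a' b := by
  obtain ⟨c, hc⟩ := h
  have e1 := PySem.Int.floordiv_mul_add_mod a b
  have e2 := PySem.Int.floordiv_mul_add_mod a' b
  have key : PySem.Int.mod a b - PySem.Int.mod a' b
      = b * (c - PySem.Int.floordiv a b + PySem.Int.floordiv a' b) := by
    linear_combination hc + e1 - e2
  rcases lt_trichotomy b 0 with hneg | hz | hpos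
  · have b1 := PySem.Int.mod_neg_bounds a hneg
    have b2 := PySem.Int.mod_neg_bounds a' hneg
    have hd : c - PySem.Int.floordiv a b + PySem.Int.floordiv a' b = 0 := by
      by_contra hne
      rcases lt_or_gt_of_ne hne with hlt | hgt
      · have hp : 0 ≤ (-b) * (-(c - PySem.Int.floordiv a b + PySem.Int.floordiv a' b) - 1) :=
          mul_nonneg (by omega) (by omega)
        nlinarith [key, b1.1, b1.2, b2.1, b2.2]
      · have hp : 0 ≤ (-b) * ((c - PySem.Int.floordiv a b + PySem.Int.floordiv a' b) - 1) :=
          mul_nonneg (by omega) (by omega)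
        nlinarith [key, b1.1, b1.2, b2.1, b2.2]
    rw [hd, mul_zero] at key
    omega
  · exact absurd hz hb
  · have b1l := PySem.Int.mod_nonneg a hpos
    have b1u := PySem.Int.mod_lt a hpos
    have b2l := PySem.Int.mod_nonneg a' hpos
    have b2u := PySem.Int.mod_lt a' hpos
    have hd : c - PySem.Int.floordiv a b + PySem.Int.floordiv a' b = 0 := by
      by_contra hne
      rcases lt_or_gt_of_ne hne with hlt | hgt
      · have hp : 0 ≤ b * (-(c - PySem.Int.floordiv a b + PySem.Int.floordiv a' b) - 1) :=
          mul_nonneg (by omega) (by omega)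
        nlinarith [key, b1l, b1u, b2l, b2u]
      · have hp : 0 ≤ b * ((c - PySem.Int.floordiv a b + PySem.Int.floordiv a' b) - 1) :=
          mul_nonneg (by omega) (by omega)
        nlinarith [key, b1l, b1u, b2l, b2u]
    rw [hd, mul_zero] at key
    omega

-- The table stores, under each key, a value that is a function of that key alone:
-- looking up any present key returns that function of the key.
lemma get?_table (bs dn pw : Int) (L : List Int) (d : PySem.Dict Int (Int × Int)) (x : Int) :
    (L.foldl (fun d t =>
        d.insert (PySem.Int.mod (14 + dn + t) bs)
          (PySem.Int.mod (bs - 1 - PySem.Int.mod (14 + dn + t) bs) bs,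
           PySem.Int.mod (-(14 + PySem.Int.mod (bs - 1 - PySem.Int.mod (14 + dn + t) bs) bs + dn + pw + 12 + 20)) bs)) d).get? x
    = if x ∈ L.map (fun t => PySem.Int.mod (14 + dn + t) bs)
      then some (PySem.Int.mod (bs - 1 - x) bs,
                 PySem.Int.mod (-(14 + PySem.Int.mod (bs - 1 - x) bs + dn + pw + 12 + 20)) bs)
      else d.get? x := by
  induction L generalizing d with
  | nil => simp
  | cons h t ih =>
    simp only [List.foldl_cons, List.map_cons, List.mem_cons]
    rw [ih]
    by_cases hx : x ∈ t.map (fun t => PySem.Int.mod (14 + dn + t) bs)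
    · simp [hx]
    · rw [if_neg hx, PySem.Dict.get?_insert]
      by_cases he : x = PySem.Int.mod (14 + dn + h) bs
      · subst he; simp
      · simp [he, hx]

-- Every residue that occurs in the lookup pass was put into the table by stage 1.
lemma residue_mem (bs dn pw i : Int) (hbs : bs ≠ 0) (h0 : 0 ≤ i) (h1 : i < pw) :
    PySem.Int.mod (14 + dn + i) bs
      ∈ (PySem.List.pyRange 0 (min pw |bs|) 1).map (fun t => PySem.Int.mod (14 + dn + t) bs) := by
  rw [List.mem_map]
  by_cases hi : i < min pw |bs|
  · exact ⟨i, PySem.List.mem_pyRange_one.mpr ⟨h0, hi⟩, rfl⟩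
  · have habs : 0 < |bs| := abs_pos.mpr hbs
    refine ⟨PySem.Int.mod i |bs|, PySem.List.mem_pyRange_one.mpr
      ⟨PySem.Int.mod_nonneg i habs, ?_⟩, ?_⟩
    · have := PySem.Int.mod_lt i habs
      omega
    · apply pymod_congr hbs
      have e := PySem.Int.floordiv_mul_add_mod i |bs|
      have hdv : bs ∣ |bs| := (dvd_abs bs bs).mpr dvd_rfl
      have : bs ∣ (PySem.Int.floordiv i |bs| * |bs|) := Dvd.dvd.mul_left hdv _
      have : bs ∣ (PySem.Int.mod i |bs| - i) := by
        have hrw : PySem.Int.mod i |bs| - i = -(PySem.Int.floordiv i |bs| * |bs|) := by omega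
        rw [hrw]; exact (dvd_neg).mpr this
      have hrw2 : 14 + dn + PySem.Int.mod i |bs| - (14 + dn + i) = PySem.Int.mod i |bs| - i := by ring
      rw [hrw2]; exact this

theorem compute_dn_lengths_spec : Claim_equal_compute_dn_lengths := by
  intro password block_size dn_base_len _ hpre
  unfold Spec_compute_dn_lengths
  by_cases hbs : block_size = 0
  · have hemp : password = "" := by
      rcases hpre with h | h
      · exact absurd hbs h
      · exact h
    subst hemp; subst hbs
    simp [compute_dn_lengths, compute_dn_lengths_alt, PySem.Str.len_eq,
      PySem.List.pyRange_one_eq_nil (le_refl (0 : Int))]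
  · simp only [compute_dn_lengths, compute_dn_lengths_alt]
    symm
    refine PySem.List.foldl_congr_mem _ _ _ _ ?_
    intro acc i hi
    obtain ⟨h0, h1⟩ := PySem.List.mem_pyRange_one.mp hi
    rw [get?_table block_size dn_base_len (PySem.Str.len password),
        if_pos (residue_mem block_size dn_base_len (PySem.Str.len password) i hbs h0 h1)]
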